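-- pv_equiv track=rewrite | github.com/slhck/ffmpeg-progress-yield | ffmpeg_progress_yield/ffmpeg_progress_yield.py | _get_inputs_with_options
-- ===== SOURCE A (Python) =====
-- from typing import Any, Callable, Iterator, List, Optional, Union
--
-- def _get_inputs_with_options(cmd: List[str]) -> List[List[str]]:
--     """
--     Collect all inputs with their options.
--     For example, input is:
--
--         ffmpeg -i input1.mp4 -i input2.mp4 -i input3.mp4 -filter_complex ...
--
--     Output is:
--
--         [
--             ["-i", "input1.mp4"],
--             ["-i", "input2.mp4"],
--             ["-i", "input3.mp4"],
--         ]
--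
--     Another example:
--
--         ffmpeg -f lavfi -i color=c=black:s=1920x1080 -loop 1 -i image.png -filter_complex ...
--
--     Output is:
--
--         [
--             ["-f", "lavfi", "-i", "color=c=black:s=1920x1080"],
--             ["-loop", "1", "-i", "image.png"],
--         ]
--     """
--     inputs = []
--     prev_index = 0
--     for i, arg in enumerate(cmd):
--         if arg == "-i":
--             inputs.append(cmd[prev_index : i + 2])
--             prev_index = i + 2
--
--     return inputs
-- ===== SOURCE B (Python) =====
-- from typing import List
--
--
-- def _get_inputs_with_options(cmd: List[str]) -> List[List[str]]:
--     # Streaming element distribution: no index arithmetic, no slicing.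
--     # Each element is pushed into a running buffer; a flag remembers whether
--     # the previous element was "-i", in which case the buffer is flushed as a
--     # finished group right after the current element joins it.
--     groups: List[List[str]] = []
--     buf: List[str] = []
--     close_next = False
--     for arg in cmd:
--         buf.append(arg)
--         if close_next:
--             groups.append(buf)
--             buf = []
--         close_next = arg == "-i"
--     if close_next:
--         groups.append(buf)
--     return groups
-- ===== Notes on version B (the rewrite author's own statement) =====
-- stated objective: alternative
-- what changed: B abandons index arithmetic and slicing entirely: it streams the elements into a running buffer and flushes the buffer as a finished group one step after each '-i' (a lookbehind flag), with a final flush when the last element was '-i'; A instead tracks prev_index and cuts slices cmd[prev:i+2] out of the whole list.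
import Mathlib
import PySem

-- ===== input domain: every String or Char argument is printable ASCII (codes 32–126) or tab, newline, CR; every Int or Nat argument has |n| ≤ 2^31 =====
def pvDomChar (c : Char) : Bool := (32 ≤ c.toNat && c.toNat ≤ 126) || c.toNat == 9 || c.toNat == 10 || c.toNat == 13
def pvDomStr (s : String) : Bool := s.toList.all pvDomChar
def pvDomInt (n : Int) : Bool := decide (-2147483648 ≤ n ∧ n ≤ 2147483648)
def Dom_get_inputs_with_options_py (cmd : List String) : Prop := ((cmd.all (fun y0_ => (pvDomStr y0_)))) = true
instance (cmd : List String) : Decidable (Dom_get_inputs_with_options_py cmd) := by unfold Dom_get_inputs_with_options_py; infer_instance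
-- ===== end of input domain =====

-- B streams elements into a running buffer flushed one step after each "-i" (no indices, no slicing), instead of A's prev_index/slice loop; proved equal to A on all inputs.


-- ===== PORT A =====
-- Transliteration of A: one loop over enumerate(cmd) carrying (inputs, prev_index), slicing cmd[prev:i+2].
def get_inputs_with_options_py (cmd : List String) : List (List String) :=
  ((PySem.List.enumerate cmd).foldl
    (fun (st : List (List String) × Int) (p : Int × String) =>
      if p.2 == "-i" then
        (st.1 ++ [PySem.List.slice cmd (some st.2) (some (p.1 + 2))], p.1 + 2)
      else st)
    ([], 0)).1

-- ===== PORT B =====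
-- Transliteration of B: fold over the elements with state (groups, buf, close_next), final flush if close_next.
def get_inputs_with_options_py_alt (cmd : List String) : List (List String) :=
  let st := cmd.foldl
    (fun (st : List (List String) × List String × Bool) (arg : String) =>
      let buf := st.2.1 ++ [arg]
      if st.2.2 then (st.1 ++ [buf], [], arg == "-i")
      else (st.1, buf, arg == "-i"))
    ([], [], false)
  if st.2.2 then st.1 ++ [st.2.1] else st.1

-- ===== PRECONDITION & SPEC =====
def Spec_get_inputs_with_options_py (cmd : List String) (out : List (List String)) : Prop := out = get_inputs_with_options_py_alt cmd
instance (cmd : List String) (out : List (List String)) : Decidable (Spec_get_inputs_with_options_py cmd out) := by unfold Spec_get_inputs_with_options_py; infer_instance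

-- ===== CLAIM (what is proved, stated in full; the proofs are below) =====
def Claim_equal_get_inputs_with_options_py : Prop := ∀ (cmd : List String), Dom_get_inputs_with_options_py cmd → Spec_get_inputs_with_options_py cmd (get_inputs_with_options_py cmd)

-- ===== LEMMAS AND PROOFS =====

-- Reference recursion: B's loop written as structural recursion on the remaining
-- elements, carrying the close_next flag and the running buffer.
def pvR : Bool → List String → List String → List (List String)
  | flag, pre, [] => if flag then [pre] else []
  | flag, pre, a :: rest =>
      if flag then (pre ++ [a]) :: pvR (a == "-i") [] rest
      else pvR (a == "-i") (pre ++ [a]) rest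

-- B's fold (with final flush) equals the reference recursion.
theorem b_eq_pvR : ∀ (tl : List String) (acc : List (List String)) (pre : List String) (flag : Bool),
    (let st := tl.foldl
      (fun (st : List (List String) × List String × Bool) (arg : String) =>
        let buf := st.2.1 ++ [arg]
        if st.2.2 then (st.1 ++ [buf], [], arg == "-i")
        else (st.1, buf, arg == "-i"))
      (acc, pre, flag)
     if st.2.2 then st.1 ++ [st.2.1] else st.1) = acc ++ pvR flag pre tl := by
  intro tl
  induction tl with
  | nil =>
    intro acc pre flag
    cases flag <;> simp [pvR]
  | cons a rest ih =>
    intro acc pre flag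
    cases flag with
    | false => simpa [pvR] using ih acc (pre ++ [a]) (a == "-i")
    | true => simpa [pvR] using ih (acc ++ [pre ++ [a]]) [] (a == "-i")

-- Extending the un-flushed buffer cmd[j:k] by the element at position k.
theorem take_succ_drop (cmd : List String) (j k : Nat) (hj : j ≤ k)
    (a : String) (ha : cmd.drop k = a :: cmd.drop (k + 1)) :
    (cmd.drop j).take (k - j) ++ [a] = (cmd.drop j).take (k + 1 - j) := by
  have hopt : cmd[k]? = some a := by
    have h0 : (cmd.drop k)[0]? = cmd[k]? := by simp [List.getElem?_drop]
    rw [ha] at h0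
    simpa using h0.symm
  have hdj : (cmd.drop j)[k - j]? = some a := by
    rw [List.getElem?_drop, show j + (k - j) = k by omega]
    exact hopt
  rw [show k + 1 - j = (k - j) + 1 by omega, List.take_add_one, hdj]
  rfl

-- A's loop invariant: the fold over the enumerated suffix of cmd equals the
-- reference recursion, where the buffer is the un-flushed segment cmd[j:k] and
-- (when close_next holds) A has already emitted the group cmd[j:k+1].
theorem a_inv (cmd : List String) : ∀ (tl : List String) (k j : Nat) (flag : Bool) (acc : List (List String)),
    j ≤ k → tl = cmd.drop k →
    ((PySem.List.enumerate tl (k : Int)).foldl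
      (fun (st : List (List String) × Int) (p : Int × String) =>
        if p.2 == "-i" then
          (st.1 ++ [PySem.List.slice cmd (some st.2) (some (p.1 + 2))], p.1 + 2)
        else st)
      (acc ++ (if flag then [(cmd.drop j).take (k + 1 - j)] else []),
       if flag then ((k : Int) + 1) else (j : Int))).1
    = acc ++ pvR flag ((cmd.drop j).take (k - j)) tl := by
  intro tl
  induction tl with
  | nil =>
    intro k j flag acc hj htl
    have hlen : cmd.length ≤ k := by
      have := congrArg List.length htl
      simp at this
      omega
    cases flag with
    | false => simp [pvR, PySem.List.enumerate]
    | true =>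
      have h1 : (cmd.drop j).take (k + 1 - j) = cmd.drop j := by
        apply List.take_of_length_le; simp; omega
      have h2 : (cmd.drop j).take (k - j) = cmd.drop j := by
        apply List.take_of_length_le; simp; omega
      simp [pvR, PySem.List.enumerate, h1, h2]
  | cons a rest ih =>
    intro k j flag acc hj htl
    have hk : k < cmd.length := by
      by_contra h
      rw [List.drop_eq_nil_of_le (by omega)] at htl
      simp at htl
    have hrest : rest = cmd.drop (k + 1) := by
      have := congrArg List.tail htl
      simpa [List.tail_drop] using this
    have hcons : cmd.drop k = a :: cmd.drop (k + 1) := by rw [← hrest, ← htl]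
    have hTS := take_succ_drop cmd j k hj a hcons
    rw [PySem.List.enumerate_cons, List.foldl_cons]
    by_cases ha : a = "-i"
    · subst ha
      cases flag with
      | false =>
        have hslice : PySem.List.slice cmd (some (j : Int)) (some ((k : Int) + 2))
            = (cmd.drop j).take (k + 1 + 1 - j) := by
          rw [show ((k : Int) + 2) = ((k + 2 : Nat) : Int) by push_cast; ring,
            PySem.List.slice_natCast]
        have ih' := ih (k + 1) j true acc (by omega) hrest
        push_cast at ih'
        simp only [if_true] at ih'
        simp only [Bool.false_eq_true, if_false, List.append_nil, beq_self_eq_true, if_true]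
        rw [hslice, show (k : Int) + 2 = (k : Int) + 1 + 1 by ring, ih', pvR]
        simp only [Bool.false_eq_true, if_false, beq_self_eq_true, hTS]
      | true =>
        have hslice : PySem.List.slice cmd (some ((k : Int) + 1)) (some ((k : Int) + 2))
            = (cmd.drop (k + 1)).take (k + 1 + 1 - (k + 1)) := by
          rw [show ((k : Int) + 1) = ((k + 1 : Nat) : Int) by push_cast; ring,
            show ((k : Int) + 2) = ((k + 2 : Nat) : Int) by push_cast; ring,
            PySem.List.slice_natCast]
        have ih' := ih (k + 1) (k + 1) true (acc ++ [(cmd.drop j).take (k + 1 - j)])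
          (le_refl _) hrest
        push_cast at ih'
        simp only [if_true, show k + 1 - k = 1 from by omega, show k - k = 0 from by omega,
          List.take_zero] at ih'
        simp only [if_true, beq_self_eq_true,
          show k + 1 + 1 - (k + 1) = 1 from by omega] at hslice ⊢
        rw [hslice, show (k : Int) + 2 = (k : Int) + 1 + 1 by ring, ih', pvR]
        simp only [if_true, beq_self_eq_true, List.append_assoc, List.singleton_append, hTS]
    · have hab : (a == "-i") = false := by simp [ha]
      cases flag with
      | false =>
        have ih' := ih (k + 1) j false acc (by omega) hrest
        push_cast at ih'
        simp only [List.append_nil] at ih'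
        simp only [hab, Bool.false_eq_true, if_false, List.append_nil]
        rw [pvR]
        simp only [hab]
        rw [← hTS] at ih'
        exact ih'
      | true =>
        have ih' := ih (k + 1) (k + 1) false (acc ++ [(cmd.drop j).take (k + 1 - j)])
          (le_refl _) hrest
        push_cast at ih'
        simp only [List.append_nil] at ih'
        simp only [hab, Bool.false_eq_true, if_false, if_true]
        rw [pvR]
        simp only [hab]
        rw [show (k : Int) + 1 = ((k + 1 : Nat) : Int) by push_cast; ring] at ih' ⊢
        rw [hTS, ih', List.append_assoc]
        simp

-- ===== VERDICT (by name: the statement is the Claim_ definition above) =====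
theorem get_inputs_with_options_py_spec : Claim_equal_get_inputs_with_options_py := by
  intro cmd _
  unfold Spec_get_inputs_with_options_py get_inputs_with_options_py get_inputs_with_options_py_alt
  have hA := a_inv cmd cmd 0 0 false [] (le_refl 0) (by simp)
  simp only [Bool.false_eq_true, if_false, List.nil_append, Nat.cast_zero,
    Nat.sub_self, List.take_zero, List.drop_zero] at hA
  have hB := b_eq_pvR cmd [] [] false
  simp only [List.nil_append] at hB
  rw [show PySem.List.enumerate cmd = PySem.List.enumerate cmd 0 from rfl, hA]
  exact hB.symm
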